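-- pv_equiv track=rewrite | github.com/Wang-Yann/LeetCodeMe | python/CrackingTheCodingInterview_6/16_26_calculator-lcci.py | calculate
-- ===== SOURCE A (Python) =====
-- def calculate(s: str) -> int:
--     if not s:
--         return 0
--     stack, num, sign = [], 0, "+"
--     for i in range(len(s)):
--         if s[i].isdigit():
--             num = num * 10 + ord(s[i]) - ord("0")
--         if (not s[i].isdigit() and not s[i].isspace()) or i == len(s) - 1:
--             if sign == "-":
--                 stack.append(-num)
--             elif sign == "+":
--                 stack.append(num)
--             elif sign == "*":
--                 stack.append(stack.pop() * num)
--             else: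
--                 tmp = stack.pop()
--                 if tmp // num < 0 and tmp % num != 0:
--                     stack.append(tmp // num + 1)
--                 else:
--                     stack.append(tmp // num)
--             sign = s[i]
--             num = 0
--     return sum(stack)
-- ===== SOURCE B (Python) =====
-- def calculate(s: str) -> int:
--     # Two integer accumulators (running sum + pending term) replace A's stack.
--     result, prev, num, sign = 0, 0, 0, "+"
--     n = len(s)
--     for i, ch in enumerate(s):
--         if ch.isdigit():
--             num = num * 10 + ord(ch) - ord("0")
--         if (not ch.isdigit() and not ch.isspace()) or i == n - 1:
--             if sign == "+":
--                 result += prev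
--                 prev = num
--             elif sign == "-":
--                 result += prev
--                 prev = -num
--             elif sign == "*":
--                 prev = prev * num
--             else:
--                 q = abs(prev) // abs(num)
--                 prev = -q if (prev < 0) != (num < 0) else q
--             sign = ch
--             num = 0
--     return result + prev
-- ===== Notes on version B (the rewrite author's own statement) =====
-- stated objective: simpler
-- what changed: Replaces A's list-as-stack (pushing signed/multiplied terms and summing the list at the end) with two integer accumulators (running result + pending term), and writes the truncate-toward-zero division as a sign-adjusted quotient of absolute values instead of A's floor-division-plus-correction.
import Mathlib
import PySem

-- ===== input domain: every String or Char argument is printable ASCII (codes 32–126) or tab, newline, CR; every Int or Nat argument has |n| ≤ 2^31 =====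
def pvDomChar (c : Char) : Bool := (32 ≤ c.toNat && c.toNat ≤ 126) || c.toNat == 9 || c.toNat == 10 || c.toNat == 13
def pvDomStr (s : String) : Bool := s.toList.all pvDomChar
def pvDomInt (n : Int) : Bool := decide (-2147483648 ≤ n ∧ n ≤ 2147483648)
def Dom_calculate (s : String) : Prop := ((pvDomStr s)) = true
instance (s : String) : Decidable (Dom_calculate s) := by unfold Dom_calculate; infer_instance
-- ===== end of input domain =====

-- B replaces A's list-as-stack of signed terms with two integer accumulators (running result + pending term); objective: simpler, same O(n) cost.

-- ===== PORT A =====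
-- Python's truncating-division idiom in A: tmp // num, corrected by +1 when the floor quotient is negative with remainder
def pvDivA (tmp num : Int) : Int :=
  if PySem.Int.floordiv tmp num < 0 ∧ PySem.Int.mod tmp num ≠ 0
  then PySem.Int.floordiv tmp num + 1 else PySem.Int.floordiv tmp num

-- one iteration of A's `for i in range(len(s))` loop; state = (stack, num, sign)
-- `stack.pop()` is ported as getLast?/dropLast; Python would raise IndexError on an empty
-- stack, but sign ≠ '+' implies a previous push, so the `.getD 0` default is never consulted
def pvStepA (n : Nat) (st : List Int × Int × Char) (p : Int × Char) : List Int × Int × Char :=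
  match st, p with
  | (stack, num, sign), (i, c) =>
    let num := if PySem.Chars.isdigit c then num * 10 + ((c.toNat : Int) - ('0'.toNat : Int)) else num
    if ((!PySem.Chars.isdigit c) && (!PySem.Chars.isspace c)) || (i == (n : Int) - 1) then
      let stack :=
        if sign = '-' then stack ++ [-num]
        else if sign = '+' then stack ++ [num]
        else if sign = '*' then stack.dropLast ++ [stack.getLast?.getD 0 * num]
        else stack.dropLast ++ [pvDivA (stack.getLast?.getD 0) num]
      (stack, 0, c)
    else (stack, num, sign)

def calculate (s : String) : Int :=
  if s.toList = [] then 0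
  else (((PySem.List.enumerate s.toList).foldl (pvStepA s.toList.length) ([], 0, '+')).1).sum

-- ===== PORT B =====
-- B's truncate-toward-zero division: quotient of absolute values, negated when signs differ
def pvDivB (prev num : Int) : Int :=
  let q : Int := ((prev.natAbs / num.natAbs : Nat) : Int)
  if (decide (prev < 0)) != (decide (num < 0)) then -q else q

-- one iteration of B's loop; state = (result, prev, num, sign)
def pvStepB (n : Nat) (st : Int × Int × Int × Char) (p : Int × Char) : Int × Int × Int × Char :=
  match st, p with
  | (result, prev, num, sign), (i, c) =>
    let num := if PySem.Chars.isdigit c then num * 10 + ((c.toNat : Int) - ('0'.toNat : Int)) else num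
    if ((!PySem.Chars.isdigit c) && (!PySem.Chars.isspace c)) || (i == (n : Int) - 1) then
      if sign = '+' then (result + prev, num, 0, c)
      else if sign = '-' then (result + prev, -num, 0, c)
      else if sign = '*' then (result, prev * num, 0, c)
      else (result, pvDivB prev num, 0, c)
    else (result, prev, num, sign)

def calculate_alt (s : String) : Int :=
  let st := (PySem.List.enumerate s.toList).foldl (pvStepB s.toList.length) (0, 0, 0, '+')
  st.1 + st.2.1

-- ===== PRECONDITION & SPEC =====
-- position i triggers an operator application in the scan (non-digit non-space char, or last index)
def pvTrig (l : List Char) (n i : Nat) : Bool :=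
  ((!PySem.Chars.isdigit (l.getD i ' ')) && (!PySem.Chars.isspace (l.getD i ' '))) || (i == n - 1)

-- Pre_ excludes exactly the inputs where Python A raises ZeroDivisionError: two consecutive
-- trigger positions whose first character is none of the three operator characters handled
-- before the division branch (so A divides) with no nonzero digit between them (so the
-- divisor is 0); B's Python raises on exactly the same inputs.  The Lean ports happen to
-- agree even there (both division transliterations yield 0 at divisor 0), so the equivalence
-- proof below holds without using the Pre_ hypothesis; Pre_ is stated because the claim is
-- only about inputs on which the Python programs return.
def Pre_calculate (s : String) : Prop :=
  ∀ j, j < s.toList.length → ∀ i, i < s.toList.length → j < i →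
    pvTrig s.toList s.toList.length j = true → pvTrig s.toList s.toList.length i = true →
    (∀ k, k < i → j < k → pvTrig s.toList s.toList.length k = false) →
    s.toList.getD j ' ' ∉ (['+', '-', '*'] : List Char) →
    ∃ k, k < s.toList.length ∧ j < k ∧ k ≤ i ∧
      s.toList.getD k ' ' ∈ (['1','2','3','4','5','6','7','8','9'] : List Char)

instance (s : String) : Decidable (Pre_calculate s) := by
  unfold Pre_calculate
  exact @Nat.decidableBallLT _ _ (fun j _ => @Nat.decidableBallLT _ _ (fun i _ => inferInstance))

def pvWitness_calculate : String := "3+5 / 2*4-1"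

def Spec_calculate (s : String) (out : Int) : Prop := out = calculate_alt s
instance (s : String) (out : Int) : Decidable (Spec_calculate s out) := by unfold Spec_calculate; infer_instance

-- ===== CLAIM (what is proved, stated in full; the proofs are below) =====
def Claim_equal_calculate : Prop := ∀ (s : String), Dom_calculate s → Pre_calculate s → Spec_calculate s (calculate s)

-- ===== LEMMAS AND PROOFS =====

-- A's floor-division-with-correction is truncation toward zero
theorem pv_divA_eq_tdiv (t m : Int) : pvDivA t m = Int.tdiv t m := by
  unfold pvDivA
  simp only [PySem.Int.floordiv]
  have hmodiff : (PySem.Int.mod t m ≠ 0) ↔ ¬ m ∣ t :=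
    not_congr (PySem.Int.mod_eq_zero_iff_dvd t m)
  by_cases hd : m ∣ t
  · have hz : PySem.Int.mod t m = 0 := (PySem.Int.mod_eq_zero_iff_dvd t m).mpr hd
    rw [Int.tdiv_eq_fdiv]
    simp [hz, hd]
  · have hmod : PySem.Int.mod t m ≠ 0 := hmodiff.mpr hd
    by_cases hm0 : m = 0
    · subst hm0
      simp [Int.tdiv_eq_fdiv, hd]
    rw [Int.tdiv_eq_fdiv]
    rcases (by omega : 0 ≤ t ∨ t < 0) with ht | ht <;> rcases (by omega : 0 ≤ m ∨ m < 0) with hm | hm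
    · have : 0 ≤ Int.fdiv t m := Int.fdiv_nonneg ht hm
      simp [hd, ht, hm]
      omega
    · have hediv : t / m ≤ 0 := by
        by_contra hq
        push_neg at hq
        have h1 := Int.ediv_add_emod t m
        have h2 := Int.emod_nonneg t hm0
        have h3 : t % m < -m := by
          have := Int.emod_lt_of_pos t (by omega : (0:Int) < -m)
          rwa [Int.emod_neg] at this
        have : m * (t / m) ≤ m * 1 := mul_le_mul_of_nonpos_left (by omega) (by omega)
        omega
      have hf : Int.fdiv t m < 0 := by
        rw [Int.fdiv_eq_ediv]
        have : ¬ (0 ≤ m ∨ m ∣ t) := by push_neg; exact ⟨by omega, hd⟩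
        simp [this]
        omega
      simp [hd, ht, hm, hf, hmod]
    · have hf : Int.fdiv t m < 0 := by
        rw [Int.fdiv_eq_ediv]
        have he : t / m < 0 := Int.ediv_neg_of_neg_of_pos ht (by omega)
        split_ifs <;> omega
      have hs : m.sign = 1 := Int.sign_eq_one_of_pos (by omega)
      simp [hd, hf, hmod]
      rw [if_neg (by omega : ¬ 0 ≤ t), if_pos hm, hs]
    · have hediv : 1 ≤ t / m := by
        have h0 : 0 ≤ t / m := Int.ediv_nonneg_of_nonpos_of_nonpos (by omega) (by omega)
        rcases eq_or_lt_of_le h0 with h1 | h1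
        · exfalso
          have h2 := Int.ediv_add_emod t m
          rw [← h1] at h2
          have h3 := Int.emod_nonneg t hm0
          omega
        · omega
      have hf : 0 ≤ Int.fdiv t m := by
        rw [Int.fdiv_eq_ediv]
        split_ifs <;> omega
      have hs : m.sign = -1 := Int.sign_eq_neg_one_of_neg hm
      have hcond : ¬ (Int.fdiv t m < 0 ∧ PySem.Int.mod t m ≠ 0) := fun h => absurd h.1 (by omega)
      rw [if_neg hcond, if_neg hd, if_neg (by omega : ¬ 0 ≤ t), if_neg (by omega : ¬ 0 ≤ m), hs]
      omega

-- B's abs-quotient-with-sign division is the same truncation toward zero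
theorem pv_divB_eq_tdiv (t m : Int) : pvDivB t m = Int.tdiv t m := by
  unfold pvDivB
  rcases t with a | a <;> rcases m with b | b <;> simp [Int.tdiv, Int.natAbs] <;> omega

theorem pv_div_eq (t m : Int) : pvDivA t m = pvDivB t m := by
  rw [pv_divA_eq_tdiv, pv_divB_eq_tdiv]

-- the relation between A's state (stack, num, sign) and B's state (result, prev, num, sign)
def pvRel (a : List Int × Int × Char) (b : Int × Int × Int × Char) : Prop :=
  a.2.1 = b.2.2.1 ∧ a.2.2 = b.2.2.2 ∧
  ((a.1 = [] ∧ a.2.2 = '+' ∧ b.1 = 0 ∧ b.2.1 = 0) ∨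
   (∃ fr, a.1 = fr ++ [b.2.1] ∧ fr.sum = b.1))

theorem pvRel_step (n : Nat) (a : List Int × Int × Char) (b : Int × Int × Int × Char)
    (p : Int × Char) (h : pvRel a b) : pvRel (pvStepA n a p) (pvStepB n b p) := by
  obtain ⟨stack, num, sign⟩ := a
  obtain ⟨result, prev, num2, sign2⟩ := b
  obtain ⟨hnum, hsign, hrel⟩ := h
  simp only at hnum hsign
  subst hnum hsign
  obtain ⟨i, c⟩ := p
  simp only [pvStepA, pvStepB]
  by_cases htrig : (((!PySem.Chars.isdigit c) && (!PySem.Chars.isspace c)) || (i == (n : Int) - 1)) = true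
  · simp only [htrig, if_true]
    set m := if PySem.Chars.isdigit c then num * 10 + ((c.toNat : Int) - ('0'.toNat : Int)) else num with hm
    rcases hrel with ⟨hst, hsg, hres, hprev⟩ | ⟨fr, hst, hsum⟩
    · subst hst hsg hres hprev
      simp only [if_neg (by decide : ¬ ('+' : Char) = '-'), if_pos rfl]
      exact ⟨rfl, rfl, Or.inr ⟨[], by simp⟩⟩
    · subst hst
      by_cases h1 : sign = '-'
      · simp only [h1, if_pos rfl, if_neg (by decide : ¬ ('-' : Char) = '+')]
        exact ⟨rfl, rfl, Or.inr ⟨fr ++ [prev], by simp [hsum]⟩⟩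
      · by_cases h2 : sign = '+'
        · simp only [h1, h2, if_neg (by decide : ¬ ('+' : Char) = '-'), if_pos rfl, if_false]
          exact ⟨rfl, rfl, Or.inr ⟨fr ++ [prev], by simp [hsum]⟩⟩
        · by_cases h3 : sign = '*'
          · simp only [h1, h2, h3, if_pos rfl, if_false]
            refine ⟨rfl, rfl, Or.inr ⟨fr, ?_, hsum⟩⟩
            simp
          · simp only [h1, h2, h3, if_false]
            refine ⟨rfl, rfl, Or.inr ⟨fr, ?_, hsum⟩⟩
            simp [pv_div_eq]
  · simp only [htrig, if_false]
    exact ⟨rfl, rfl, hrel⟩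

theorem pvRel_foldl (n : Nat) (ps : List (Int × Char)) (a : List Int × Int × Char)
    (b : Int × Int × Int × Char) (h : pvRel a b) :
    pvRel (ps.foldl (pvStepA n) a) (ps.foldl (pvStepB n) b) := by
  induction ps generalizing a b with
  | nil => exact h
  | cons p ps ih => exact ih _ _ (pvRel_step n a b p h)

theorem pv_calc_eq (s : String) : calculate s = calculate_alt s := by
  unfold calculate calculate_alt
  by_cases hnil : s.toList = []
  · simp [hnil, PySem.List.enumerate]
  · rw [if_neg hnil]
    have h := pvRel_foldl s.toList.length (PySem.List.enumerate s.toList) ([], 0, '+') (0, 0, 0, '+')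
      ⟨rfl, rfl, Or.inl ⟨rfl, rfl, rfl, rfl⟩⟩
    obtain ⟨-, -, hrel⟩ := h
    rcases hrel with ⟨h1, -, h3, h4⟩ | ⟨fr, h1, h2⟩
    · simp only [h1, h3, h4]
      simp
    · simp only [h1, ← h2]
      simp

-- ===== VERDICT (by name: the statement is the Claim_ definition above) =====
theorem calculate_spec : Claim_equal_calculate := by
  intro s _ _
  unfold Spec_calculate
  exact pv_calc_eq s
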